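-- pv_equiv track=rewrite | github.com/houssein-rachini/rainfall_estimation | filter_chirps_csvs.py | pick_country_col
-- ===== SOURCE A (Python) =====
-- def pick_country_col(cols):
--     for c in cols:
--         if c.strip().lower() == "country_name":
--             return c
--     for c in cols:
--         if "country" in c.lower():
--             return c
--     return None
-- ===== SOURCE B (Python) =====
-- def pick_country_col(cols):
--     # Single pass: exact 'country_name' wins immediately; remember the first
--     # substring match as a fallback.
--     fallback = None
--     for c in cols:
--         if c.strip().lower() == "country_name":
--             return c
--         if fallback is None and "country" in c.lower():
--             fallback = c
--     return fallback
-- ===== Notes on version B (the rewrite author's own statement) =====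
-- stated objective: alternative
-- what changed: Replaces A's two sequential scans with one pass that returns an exact 'country_name' match immediately and remembers the first substring match as a fallback.
import Mathlib
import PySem

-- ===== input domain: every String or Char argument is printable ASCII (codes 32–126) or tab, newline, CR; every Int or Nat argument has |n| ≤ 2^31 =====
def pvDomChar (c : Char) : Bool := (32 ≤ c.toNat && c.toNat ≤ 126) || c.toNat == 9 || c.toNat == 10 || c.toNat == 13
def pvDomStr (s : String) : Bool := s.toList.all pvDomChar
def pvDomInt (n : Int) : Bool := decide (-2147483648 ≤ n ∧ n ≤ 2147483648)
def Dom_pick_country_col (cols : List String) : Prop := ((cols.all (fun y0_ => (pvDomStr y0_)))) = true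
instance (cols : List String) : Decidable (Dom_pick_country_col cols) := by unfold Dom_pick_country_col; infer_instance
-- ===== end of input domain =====

-- B replaces A's two sequential scans by a single pass that returns an exact
-- 'country_name' match immediately and keeps the first substring match as a
-- fallback (objective: alternative decomposition, same cost).

-- ===== PORT A =====
-- first loop of A: first column whose strip().lower() equals "country_name"
def pickExactA : List String → Option String
  | [] => none
  | c :: rest =>
    if PySem.Str.lower (PySem.Str.strip c) == "country_name" then some c
    else pickExactA rest

-- second loop of A: first column containing "country" (case-insensitive)
def pickSubA : List String → Option String
  | [] => none
  | c :: rest =>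
    if PySem.Str.isIn "country" (PySem.Str.lower c) then some c
    else pickSubA rest

def pick_country_col (cols : List String) : Option String :=
  match pickExactA cols with
  | some c => some c
  | none => pickSubA cols

-- ===== PORT B =====
-- single pass with a remembered fallback (Source B's loop)
def loopB : List String → Option String → Option String
  | [], fb => fb
  | c :: rest, fb =>
    if PySem.Str.lower (PySem.Str.strip c) == "country_name" then some c
    else loopB rest
      (if fb.isNone && PySem.Str.isIn "country" (PySem.Str.lower c) then some c else fb)

def pick_country_col_alt (cols : List String) : Option String :=
  loopB cols none

-- ===== PRECONDITION & SPEC =====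
def Spec_pick_country_col (cols : List String) (out : Option String) : Prop := out = pick_country_col_alt cols
instance (cols : List String) (out : Option String) : Decidable (Spec_pick_country_col cols out) := by unfold Spec_pick_country_col; infer_instance

-- ===== CLAIM (what is proved, stated in full; the proofs are below) =====
def Claim_equal_pick_country_col : Prop := ∀ (cols : List String), Dom_pick_country_col cols → Spec_pick_country_col cols (pick_country_col cols)

-- ===== LEMMAS AND PROOFS =====
-- loop invariant of B's single pass: an exact match wins; otherwise the
-- fallback (if already set) or A's substring scan decides.
theorem loopB_eq (cols : List String) : ∀ fb : Option String,
    loopB cols fb =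
      match pickExactA cols with
      | some c => some c
      | none => match fb with
        | some f => some f
        | none => pickSubA cols := by
  induction cols with
  | nil => intro fb; cases fb <;> simp [loopB, pickExactA, pickSubA]
  | cons c rest ih =>
    intro fb
    by_cases hx : (PySem.Str.lower (PySem.Str.strip c) == "country_name") = true
    · simp only [loopB, pickExactA, if_pos hx]
    · simp only [loopB, pickExactA, pickSubA, if_neg hx]
      rw [ih]
      cases fb with
      | some f =>
        simp only [Option.isNone_some, Bool.false_and, Bool.false_eq_true]
        cases pickExactA rest <;> rfl
      | none =>
        simp only [Option.isNone_none, Bool.true_and]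
        by_cases hs : (PySem.Str.isIn "country" (PySem.Str.lower c)) = true
        · rw [if_pos hs, if_pos hs]
        · rw [if_neg hs, if_neg hs]

-- ===== VERDICT (by name: the statement is the Claim_ definition above) =====
theorem pick_country_col_spec : Claim_equal_pick_country_col := by
  intro cols _
  unfold Spec_pick_country_col pick_country_col pick_country_col_alt
  rw [loopB_eq]
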